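-- pv_equiv track=rewrite | github.com/EldarShalev/advanced_deep_learning | main.py | create_word_genre_dict
-- ===== SOURCE A (Python) =====
-- from collections import defaultdict
--
-- def create_word_genre_dict(songs, songs_with_genre):
--     dict_words = defaultdict(lambda: defaultdict(int))
--     dict_genre = defaultdict(lambda: defaultdict(int))
--     for (song, genre) in zip(songs, songs_with_genre):
--         for word in song:
--             dict_words[word][genre] += 1
--             dict_genre[genre][word] += 1
--
--     return dict_words, dict_genre
-- ===== SOURCE B (Python) =====
-- from collections import defaultdict
--
--
-- def _tally(pairs):
--     d = defaultdict(lambda: defaultdict(int))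
--     for k, sub in pairs:
--         d[k][sub] += 1
--     return d
--
--
-- def create_word_genre_dict(songs, songs_with_genre):
--     pairs = [(w, g) for song, g in zip(songs, songs_with_genre) for w in song]
--     return _tally(pairs), _tally([(g, w) for (w, g) in pairs])
-- ===== Notes on version B (the rewrite author's own statement) =====
-- stated objective: simpler
-- what changed: B flattens zip(songs, songs_with_genre) into one word-genre pair list and builds each nested table with a single generic _tally helper (applied to the pairs and to the swapped pairs), instead of A's nested loop incrementing both nested defaultdicts inline.
import Mathlib
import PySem

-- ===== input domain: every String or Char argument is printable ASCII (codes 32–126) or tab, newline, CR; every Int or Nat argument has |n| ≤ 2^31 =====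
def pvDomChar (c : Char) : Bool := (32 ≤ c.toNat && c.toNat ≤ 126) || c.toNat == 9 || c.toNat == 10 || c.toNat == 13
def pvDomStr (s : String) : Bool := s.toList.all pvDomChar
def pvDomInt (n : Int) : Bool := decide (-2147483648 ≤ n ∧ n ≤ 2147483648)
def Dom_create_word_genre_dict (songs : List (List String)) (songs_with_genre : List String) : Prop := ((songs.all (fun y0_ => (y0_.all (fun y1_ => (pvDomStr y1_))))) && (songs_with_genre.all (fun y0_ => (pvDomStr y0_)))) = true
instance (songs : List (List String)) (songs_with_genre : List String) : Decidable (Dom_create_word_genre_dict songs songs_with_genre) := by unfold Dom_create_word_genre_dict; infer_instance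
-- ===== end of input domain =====

-- B replaces A's single pass that increments two nested dicts inline by flattening zip(songs, genres)
-- into a word-genre pair list and building each table with one generic tally helper (objective: simpler).

-- ===== PORT A =====
-- one combined pass over zip(songs, songs_with_genre); both nested defaultdicts updated per word
def create_word_genre_dict (songs : List (List String)) (songs_with_genre : List String) : (List (String × List (String × Int))) × (List (String × List (String × Int))) :=
  let dicts :=
    (songs.zip songs_with_genre).foldl
      (fun st sg =>
        sg.1.foldl
          (fun st word =>
            (st.1.modify word PySem.Dict.empty (fun inner => inner.modify sg.2 0 (· + 1)),
             st.2.modify sg.2 PySem.Dict.empty (fun inner => inner.modify word 0 (· + 1))))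
          st)
      (PySem.Dict.empty, PySem.Dict.empty)
  (dicts.1.items.map (fun kv => (kv.1, kv.2.items)),
   dicts.2.items.map (fun kv => (kv.1, kv.2.items)))

-- ===== PORT B =====
-- _tally: one generic counting helper, d[k][sub] += 1 over a flat pair list
def pvTally (pairs : List (String × String)) : PySem.Dict String (PySem.Dict String Int) :=
  pairs.foldl
    (fun d p => d.modify p.1 PySem.Dict.empty (fun inner => inner.modify p.2 0 (· + 1)))
    PySem.Dict.empty

def create_word_genre_dict_alt (songs : List (List String)) (songs_with_genre : List String) : (List (String × List (String × Int))) × (List (String × List (String × Int))) :=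
  let pairs := (songs.zip songs_with_genre).flatMap (fun sg => sg.1.map (fun w => (w, sg.2)))
  ((pvTally pairs).items.map (fun kv => (kv.1, kv.2.items)),
   (pvTally (pairs.map (fun p => (p.2, p.1)))).items.map (fun kv => (kv.1, kv.2.items)))

-- ===== PRECONDITION & SPEC =====
def Spec_create_word_genre_dict (songs : List (List String)) (songs_with_genre : List String) (out : (List (String × List (String × Int))) × (List (String × List (String × Int)))) : Prop := out = create_word_genre_dict_alt songs songs_with_genre
instance (songs : List (List String)) (songs_with_genre : List String) (out : (List (String × List (String × Int))) × (List (String × List (String × Int)))) : Decidable (Spec_create_word_genre_dict songs songs_with_genre out) := by unfold Spec_create_word_genre_dict; infer_instance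

-- ===== CLAIM (what is proved, stated in full; the proofs are below) =====
def Claim_equal_create_word_genre_dict : Prop := ∀ (songs : List (List String)) (songs_with_genre : List String), Dom_create_word_genre_dict songs songs_with_genre → Spec_create_word_genre_dict songs songs_with_genre (create_word_genre_dict songs songs_with_genre)

-- ===== LEMMAS AND PROOFS =====

-- a fold of inner folds over g x is a fold over the flattened list
theorem foldl_foldl_eq_foldl_flatMap {α β γ : Type} (l : List α) (g : α → List β)
    (f : γ → β → γ) (init : γ) :
    l.foldl (fun s x => (g x).foldl f s) init = (l.flatMap g).foldl f init := by
  induction l generalizing init with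
  | nil => rfl
  | cons x xs ih => simp [List.foldl_append, ih]

-- A's combined two-dict pass splits into the two independent tallies B runs
theorem dicts_split (songs : List (List String)) (songs_with_genre : List String) :
    (songs.zip songs_with_genre).foldl
      (fun st sg =>
        sg.1.foldl
          (fun st word =>
            (st.1.modify word PySem.Dict.empty (fun inner => inner.modify sg.2 0 (· + 1)),
             st.2.modify sg.2 PySem.Dict.empty (fun inner => inner.modify word 0 (· + 1))))
          st)
      (PySem.Dict.empty, PySem.Dict.empty)
    = (pvTally ((songs.zip songs_with_genre).flatMap (fun sg => sg.1.map (fun w => (w, sg.2)))),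
       pvTally (((songs.zip songs_with_genre).flatMap (fun sg => sg.1.map (fun w => (w, sg.2)))).map
         (fun p => (p.2, p.1)))) := by
  have hstep : ∀ (st : PySem.Dict String (PySem.Dict String Int) × PySem.Dict String (PySem.Dict String Int))
      (sg : List String × String),
      sg.1.foldl
        (fun st word =>
          (st.1.modify word PySem.Dict.empty (fun inner => inner.modify sg.2 0 (· + 1)),
           st.2.modify sg.2 PySem.Dict.empty (fun inner => inner.modify word 0 (· + 1))))
        st
      = (sg.1.foldl (fun d word => d.modify word PySem.Dict.empty (fun inner => inner.modify sg.2 0 (· + 1))) st.1,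
         sg.1.foldl (fun d word => d.modify sg.2 PySem.Dict.empty (fun inner => inner.modify word 0 (· + 1))) st.2) := by
    intro st sg
    rw [← Prod.mk.eta (p := st)]
    exact PySem.List.foldl_prod_mk
      (fun d word => d.modify word PySem.Dict.empty (fun inner => inner.modify sg.2 0 (· + 1)))
      (fun d word => d.modify sg.2 PySem.Dict.empty (fun inner => inner.modify word 0 (· + 1)))
      sg.1 st.1 st.2
  rw [funext (fun st => funext (fun sg => hstep st sg))]
  refine Eq.trans
    (PySem.List.foldl_prod_mk
      (fun (d : PySem.Dict String (PySem.Dict String Int)) (sg : List String × String) =>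
        sg.1.foldl (fun d word => d.modify word PySem.Dict.empty (fun inner => inner.modify sg.2 0 (· + 1))) d)
      (fun (d : PySem.Dict String (PySem.Dict String Int)) (sg : List String × String) =>
        sg.1.foldl (fun d word => d.modify sg.2 PySem.Dict.empty (fun inner => inner.modify word 0 (· + 1))) d)
      (songs.zip songs_with_genre) PySem.Dict.empty PySem.Dict.empty) ?_
  unfold pvTally
  rw [List.map_flatMap]
  congr 1
  · rw [← foldl_foldl_eq_foldl_flatMap]
    apply PySem.List.foldl_congr_mem
    intro d sg _
    rw [List.foldl_map]
  · rw [← foldl_foldl_eq_foldl_flatMap]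
    apply PySem.List.foldl_congr_mem
    intro d sg _
    simp only [List.map_map]
    rw [List.foldl_map]
    rfl

-- ===== VERDICT (by name: the statement is the Claim_ definition above) =====
theorem create_word_genre_dict_spec : Claim_equal_create_word_genre_dict := by
  intro songs songs_with_genre _
  unfold Spec_create_word_genre_dict create_word_genre_dict create_word_genre_dict_alt
  rw [dicts_split]
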